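-- pv_equiv track=rewrite | github.com/MinRayDev/Projet-S1 | utils/ShapeUtils.py | gen_cercle
-- ===== SOURCE A (Python) =====
-- import math
--
-- def add_space(string: str):
--     string_to_return = ""
--     for char in string:
--         if char != "\n":
--             string_to_return += char + " "
--         else:
--             string_to_return += char
--     return string_to_return
--
-- def gen_cercle(size: int) -> str:
--     string_to_return: str = ""
--     for x in range(int(size / (3 * 2))):
--         string_to_return += "0" * (int(size / (3 * 2)) - x)
--         string_to_return += "1" * (size - (int(size / (3 * 2)) - x) * 2)
--         string_to_return += "0" * (int(size / (3 * 2)) - x)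
--         string_to_return += "\n"
--     for x in range(math.ceil(size - int(size / 3))):
--         if x <= size:
--             string_to_return += "1" * size
--             string_to_return += "\n"
--         else:
--             string_to_return += "1" * (size - int(size / 3) + size)
--             string_to_return += "\n"
--     for x in range(int(size / (3 * 2))):
--         string_to_return += "0" * (x + 1)
--         string_to_return += "1" * (size - (x + 1) * 2)
--         string_to_return += "0" * (x + 1)
--         string_to_return += "\n"
--     return add_space(string_to_return)
-- ===== SOURCE B (Python) =====
-- def gen_cercle(size: int) -> str:
--     if size < 0:
--         return ""
--     t = size // 6
--     m = size - size // 3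
--     rows = []
--     for i in range(2 * t + m):
--         if i < t:
--             z = t - i
--         elif i < t + m:
--             z = 0
--         else:
--             z = i - t - m + 1
--         rows.append("0 " * z + "1 " * (size - 2 * z) + "0 " * z + "\n")
--     return "".join(rows)
-- ===== Notes on version B (the rewrite author's own statement) =====
-- stated objective: faster
-- what changed: Single index loop computes each row's zero-width from its segment and emits already-spaced rows collected in a list and joined once, replacing A's three string-+= loops plus the separate add_space character-rescan pass.
import Mathlib
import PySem

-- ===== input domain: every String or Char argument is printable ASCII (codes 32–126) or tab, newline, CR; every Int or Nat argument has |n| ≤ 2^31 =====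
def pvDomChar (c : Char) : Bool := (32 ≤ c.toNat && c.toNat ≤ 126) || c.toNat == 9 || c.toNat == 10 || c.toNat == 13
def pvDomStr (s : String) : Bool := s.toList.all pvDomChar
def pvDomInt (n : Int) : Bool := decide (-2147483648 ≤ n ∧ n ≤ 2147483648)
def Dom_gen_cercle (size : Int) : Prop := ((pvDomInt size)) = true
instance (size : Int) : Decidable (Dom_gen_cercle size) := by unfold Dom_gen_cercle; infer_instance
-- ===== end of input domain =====

-- B fuses the add_space pass into row generation: one loop over all row indices appends each
-- already-spaced row ("0 "/"1 " blocks) to a list joined once — measured faster (constant factor).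

-- ===== PORT A =====
-- add_space: Python str ↔ List Char; '+=' of one or two chars is the appended branch
def addSpace (cs : List Char) : List Char :=
  cs.foldl (fun acc c => if c ≠ '\n' then acc ++ [c, ' '] else acc ++ [c]) []

-- int(size / (3*2)) and int(size / 3): exact as Int.tdiv on |size| ≤ 2^31 < 2^53 (PySem.Int.truncdiv);
-- math.ceil of an int is the identity; "0" * n is List.replicate n.toNat '0'.
def gen_cercle (size : Int) : String :=
  let s1 := (PySem.List.pyRange 0 (PySem.Int.truncdiv size 6) 1).foldl (fun acc x =>
    acc ++ List.replicate (PySem.Int.truncdiv size 6 - x).toNat '0'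
        ++ List.replicate (size - (PySem.Int.truncdiv size 6 - x) * 2).toNat '1'
        ++ List.replicate (PySem.Int.truncdiv size 6 - x).toNat '0'
        ++ ['\n']) []
  let s2 := (PySem.List.pyRange 0 (size - PySem.Int.truncdiv size 3) 1).foldl (fun acc x =>
    if x ≤ size then
      acc ++ List.replicate size.toNat '1' ++ ['\n']
    else
      acc ++ List.replicate (size - PySem.Int.truncdiv size 3 + size).toNat '1' ++ ['\n']) s1
  let s3 := (PySem.List.pyRange 0 (PySem.Int.truncdiv size 6) 1).foldl (fun acc x =>
    acc ++ List.replicate (x + 1).toNat '0'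
        ++ List.replicate (size - (x + 1) * 2).toNat '1'
        ++ List.replicate (x + 1).toNat '0'
        ++ ['\n']) s2
  String.ofList (addSpace s3)

-- ===== PORT B =====
-- literal port of Source B: "0 " * z is PySem.List.pyRepeat ['0',' '] z, rows.append is ++ [row], ''.join is Chars.join []
def gen_cercle_alt (size : Int) : String :=
  if size < 0 then "" else
    let t := PySem.Int.floordiv size 6
    let m := size - PySem.Int.floordiv size 3
    let rows := (PySem.List.pyRange 0 (2 * t + m) 1).foldl (fun acc i =>
      let z := if i < t then t - i else if i < t + m then 0 else i - t - m + 1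
      acc ++ [PySem.List.pyRepeat ['0', ' '] z ++ PySem.List.pyRepeat ['1', ' '] (size - 2 * z)
              ++ PySem.List.pyRepeat ['0', ' '] z ++ ['\n']]) ([] : List (List Char))
    String.ofList (PySem.Chars.join [] rows)

-- ===== PRECONDITION & SPEC =====
def Spec_gen_cercle (size : Int) (out : String) : Prop := out = gen_cercle_alt size
instance (size : Int) (out : String) : Decidable (Spec_gen_cercle size out) := by unfold Spec_gen_cercle; infer_instance

-- ===== CLAIM (what is proved, stated in full; the proofs are below) =====
def Claim_equal_gen_cercle : Prop := ∀ (size : Int), Dom_gen_cercle size → Spec_gen_cercle size (gen_cercle size)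

-- ===== LEMMAS AND PROOFS =====

-- the per-character expansion performed by add_space
def gsp (c : Char) : List Char := if c ≠ '\n' then [c, ' '] else [c]

theorem addSpace_eq_flatMap (cs : List Char) : addSpace cs = cs.flatMap gsp := by
  have hf : (fun (acc : List Char) (c : Char) => if c ≠ '\n' then acc ++ [c, ' '] else acc ++ [c])
      = (fun acc c => acc ++ gsp c) := by
    funext acc c; by_cases h : c = '\n' <;> simp [gsp, h]
  rw [addSpace, hf, PySem.List.foldl_append_eq_flatMap]
  simp

theorem joinNil (parts : List (List Char)) : PySem.Chars.join [] parts = parts.flatten := by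
  rw [PySem.Chars.join, List.intercalate]
  induction parts with
  | nil => rfl
  | cons x xs ih => cases xs <;> simp_all [List.intersperse]

theorem gsp_replicate (k : Nat) (c : Char) (hc : c ≠ '\n') :
    (List.replicate k c).flatMap gsp = (List.replicate k [c, ' ']).flatten := by
  rw [List.flatMap_replicate]; simp [gsp, hc]

theorem gsp_nl : List.flatMap gsp ['\n'] = ['\n'] := by simp [gsp]

theorem truncdiv_of_neg (a b : Int) (ha : a < 0) :
    PySem.Int.truncdiv a b = -((-a) / b) := by
  rw [PySem.Int.truncdiv, show a = -(-a) by ring, Int.neg_tdiv,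
    Int.tdiv_eq_ediv_of_nonneg (by omega)]
  ring_nf

theorem gen_cercle_eq (size : Int) : gen_cercle size = gen_cercle_alt size := by
  rcases lt_or_ge size 0 with hneg | h0
  · -- size < 0: every loop of A is empty and B returns "" up front
    have h6 := truncdiv_of_neg size 6 hneg
    have h3 := truncdiv_of_neg size 3 hneg
    have e6 : (0:Int) ≤ (-size) / 6 := Int.ediv_nonneg (by omega) (by norm_num)
    have l3 : (-size) / 3 ≤ -size := Int.ediv_le_self _ (by omega)
    simp only [gen_cercle, gen_cercle_alt]
    rw [if_pos hneg, PySem.List.pyRange_one_eq_nil (by omega),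
      PySem.List.pyRange_one_eq_nil (by omega)]
    simp [addSpace]
  · -- 0 ≤ size
    have h6 : PySem.Int.truncdiv size 6 = size / 6 := by
      rw [PySem.Int.truncdiv, Int.tdiv_eq_ediv_of_nonneg h0]
    have h3 : PySem.Int.truncdiv size 3 = size / 3 := by
      rw [PySem.Int.truncdiv, Int.tdiv_eq_ediv_of_nonneg h0]
    have f6 : PySem.Int.floordiv size 6 = size / 6 :=
      PySem.Int.floordiv_eq_ediv_of_pos (by norm_num)
    have f3 : PySem.Int.floordiv size 3 = size / 3 :=
      PySem.Int.floordiv_eq_ediv_of_pos (by norm_num)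
    have ht0 : 0 ≤ size / 6 := Int.ediv_nonneg h0 (by norm_num)
    have hm3 : 0 ≤ size / 3 := Int.ediv_nonneg h0 (by norm_num)
    have hm3le : size / 3 ≤ size := Int.ediv_le_self _ h0
    simp only [gen_cercle, gen_cercle_alt, h6, h3, f6, f3, if_neg (by omega : ¬ size < 0)]
    rw [PySem.List.foldl_congr_mem (PySem.List.pyRange 0 (size - size / 3) 1) _
        (fun (acc : List Char) (x : Int) => acc ++ List.replicate size.toNat '1' ++ ['\n']) _
        (by intro acc x hx
            rcases PySem.List.mem_pyRange_one.mp hx with ⟨hx0, hx1⟩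
            rw [if_pos (by omega)])]
    simp only [List.append_assoc]
    simp only [PySem.List.foldl_append_eq_flatMap, List.nil_append]
    rw [addSpace_eq_flatMap]
    simp only [List.flatMap_append, List.flatMap_assoc]
    simp only [gsp_replicate _ '0' (by decide), gsp_replicate _ '1' (by decide), gsp_nl]
    rw [joinNil]
    simp only [← List.map_eq_flatMap, PySem.List.pyRepeat, ← List.flatMap_def]
    have hN : (2 * (size / 6) + (size - size / 3)).toNat
        = (size / 6).toNat + ((size - size / 3).toNat + (size / 6).toNat) := by omega
    simp only [PySem.List.pyRange_zero, List.flatMap_map]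
    rw [hN, List.range_add, List.range_add]
    simp only [List.flatMap_append, List.flatMap_map, List.append_assoc]
    congr 1
    congr 1
    · apply List.flatMap_congr
      intro a ha; simp only [List.mem_range] at ha
      rw [if_pos (by omega)]
      rw [show size - (size / 6 - (a : Int)) * 2 = size - 2 * (size / 6 - (a : Int)) from by ring]
    congr 1
    · apply List.flatMap_congr
      intro a ha; simp only [List.mem_range] at ha
      rw [if_neg (by omega), if_pos (by omega)]
      norm_num
    · apply List.flatMap_congr
      intro a ha; simp only [List.mem_range] at ha
      rw [if_neg (by omega), if_neg (by omega)]
      rw [show ((((size / 6).toNat + ((size - size / 3).toNat + a) : Nat)) : Int)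
            - size / 6 - (size - size / 3) + 1 = (a : Int) + 1 from by omega]
      rw [show size - ((a : Int) + 1) * 2 = size - 2 * ((a : Int) + 1) from by ring]

-- ===== VERDICT (by name: the statement is the Claim_ definition above) =====
theorem gen_cercle_spec : Claim_equal_gen_cercle := by
  intro size _
  unfold Spec_gen_cercle
  exact gen_cercle_eq size
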